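-- pv_equiv track=rewrite | github.com/goodProgrmer/the-Owl-witches-duel-v2-for-progect-sowing | game/menu_before_playing/connect.py | ips_unzip
-- ===== SOURCE A (Python) =====
-- def ips_unzip(string):
--     letters="0123456789qwertyuiopasdfghjklzxcvbnmQWERTYUIOPASDFGHJKLZXCVBNM"
--     num= 0
--     digit=1
--     for l in string:
--         num+= letters.find(l)*digit
--         digit*=len(letters)
--     ans=[]
--     while(num>0):
--         ans.append([])
--         for i in range(4):
--             ans[-1].append(str(num%256))
--             num= num//256
--
--     for i in range(len(ans)):
--         ans[i]= ".".join(ans[i])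
--     return ans
-- ===== SOURCE B (Python) =====
-- def ips_unzip(string):
--     letters = "0123456789qwertyuiopasdfghjklzxcvbnmQWERTYUIOPASDFGHJKLZXCVBNM"
--     num = 0
--     digit = 1
--     for l in string:
--         num += letters.find(l) * digit
--         digit *= len(letters)
--     bytes_ = []
--     while num > 0:
--         bytes_.append(str(num % 256))
--         num //= 256
--     bytes_ += ["0"] * (-len(bytes_) % 4)
--     return _groups4(bytes_)
--
--
-- def _groups4(bs):
--     if not bs:
--         return []
--     return [".".join(bs[:4])] + _groups4(bs[4:])
-- ===== Notes on version B (the rewrite author's own statement) =====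
-- stated objective: alternative
-- what changed: Instead of A's nested while/for that builds per-group 4-byte lists and a final join pass, B extracts all base-256 bytes in one flat loop, pads the flat list with zero-bytes to a multiple of 4 in closed form, and chunks it into dot-joined groups of four recursively.
import Mathlib
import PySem

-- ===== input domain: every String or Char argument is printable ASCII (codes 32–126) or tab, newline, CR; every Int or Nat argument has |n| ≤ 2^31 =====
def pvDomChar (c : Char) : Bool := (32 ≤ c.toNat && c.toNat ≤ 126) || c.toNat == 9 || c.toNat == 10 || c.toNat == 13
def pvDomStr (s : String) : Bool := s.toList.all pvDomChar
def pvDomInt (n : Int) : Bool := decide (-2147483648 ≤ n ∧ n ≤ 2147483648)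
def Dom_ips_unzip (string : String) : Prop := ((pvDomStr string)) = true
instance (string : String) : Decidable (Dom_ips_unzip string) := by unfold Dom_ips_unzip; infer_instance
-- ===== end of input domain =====

-- B replaces A's nested group-building while/for with flat byte extraction, closed-form padding and
-- recursive chunking into fours: a different decomposition of the same exact computation (no speed claim).

-- shared by both ports: both Pythons begin with the identical base-62 decoding loop
def pvLetters : String := "0123456789qwertyuiopasdfghjklzxcvbnmQWERTYUIOPASDFGHJKLZXCVBNM"

def pvDecode (string : String) : Int :=
  (string.toList.foldl
    (fun (st : Int × Int) l =>
      (st.1 + PySem.Str.find pvLetters (String.ofList [l]) * st.2,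
       st.2 * PySem.Str.len pvLetters))
    (0, 1)).1

-- arithmetic fact used by the termination proofs of both ports' loops
theorem pvFdStep (n : Int) (h : 0 ≤ n) :
    0 ≤ PySem.Int.floordiv n 256 ∧ PySem.Int.floordiv n 256 ≤ n ∧
      (0 < n → PySem.Int.floordiv n 256 < n) := by
  have h1 := PySem.Int.floordiv_mul_add_mod n 256
  have h2 := PySem.Int.mod_nonneg n (b := 256) (by norm_num)
  have h3 := PySem.Int.mod_lt n (b := 256) (by norm_num)
  omega

-- ===== PORT A =====
-- A's 'while num>0: ans.append([]); for i in range(4): ans[-1].append(str(num%256)); num//=256'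
def ipsLoopA (num : Int) : List (List String) :=
  if h : 0 < num then
    let st := (PySem.List.pyRange 0 4 1).foldl
      (fun (st : List String × Int) _ =>
        (st.1 ++ [PySem.Int.toStr (PySem.Int.mod st.2 256)], PySem.Int.floordiv st.2 256))
      ([], num)
    st.1 :: ipsLoopA st.2
  else []
termination_by num.toNat
decreasing_by
  simp only [show PySem.List.pyRange 0 4 1 = [0, 1, 2, 3] from by decide, List.foldl]
  have h0 := pvFdStep num (le_of_lt h)
  have h1 := pvFdStep _ h0.1
  have h2 := pvFdStep _ h1.1
  have h3 := pvFdStep _ h2.1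
  omega

def ips_unzip (string : String) : List String :=
  (ipsLoopA (pvDecode string)).map (fun g => PySem.Str.join "." g)

-- ===== PORT B =====
-- B's flat 'while num>0: bytes_.append(str(num%256)); num//=256'
def pvFlatBytes (num : Int) : List String :=
  if _h : 0 < num then
    PySem.Int.toStr (PySem.Int.mod num 256) :: pvFlatBytes (PySem.Int.floordiv num 256)
  else []
termination_by num.toNat
decreasing_by
  have h0 := pvFdStep num (le_of_lt _h)
  omega

-- B's helper _groups4: recursive chunking into dot-joined groups of four
def pvGroups4 (bs : List String) : List String :=
  if bs = [] then []
  else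
    PySem.Str.join "." (PySem.List.slice bs (some 0) (some 4))
      :: pvGroups4 (PySem.List.slice bs (some 4) none)
termination_by bs.length
decreasing_by
  rw [PySem.List.slice_from bs (by norm_num)]
  cases bs with
  | nil => simp_all
  | cons a t => simp only [List.length_drop, List.length_cons]; omega

def ips_unzip_alt (string : String) : List String :=
  let num := pvDecode string
  let bs := pvFlatBytes num
  let bs2 := bs ++ List.replicate ((PySem.Int.mod (-(bs.length : Int)) 4).toNat) "0"
  pvGroups4 bs2

-- ===== PRECONDITION & SPEC =====
def Spec_ips_unzip (string : String) (out : List String) : Prop := out = ips_unzip_alt string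
instance (string : String) (out : List String) : Decidable (Spec_ips_unzip string out) := by unfold Spec_ips_unzip; infer_instance

-- ===== CLAIM (what is proved, stated in full; the proofs are below) =====
def Claim_equal_ips_unzip : Prop := ∀ (string : String), Dom_ips_unzip string → Spec_ips_unzip string (ips_unzip string)

-- ===== LEMMAS AND PROOFS =====

-- the flat byte list, padded with "0" to a multiple of 4 (defeq to the value ips_unzip_alt chunks)
def pvPadded (num : Int) : List String :=
  pvFlatBytes num ++
    List.replicate ((PySem.Int.mod (-((pvFlatBytes num).length : Int)) 4).toNat) "0"

theorem pvLoopA_nonpos (num : Int) (h : ¬ 0 < num) : ipsLoopA num = [] := by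
  rw [ipsLoopA, dif_neg h]

theorem pvLoopA_pos (num : Int) (h : 0 < num) :
    ipsLoopA num =
      [PySem.Int.toStr (PySem.Int.mod num 256),
       PySem.Int.toStr (PySem.Int.mod (PySem.Int.floordiv num 256) 256),
       PySem.Int.toStr (PySem.Int.mod (PySem.Int.floordiv (PySem.Int.floordiv num 256) 256) 256),
       PySem.Int.toStr (PySem.Int.mod (PySem.Int.floordiv (PySem.Int.floordiv (PySem.Int.floordiv num 256) 256) 256) 256)]
      :: ipsLoopA (PySem.Int.floordiv (PySem.Int.floordiv (PySem.Int.floordiv (PySem.Int.floordiv num 256) 256) 256) 256) := by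
  rw [ipsLoopA, dif_pos h]
  simp only [show PySem.List.pyRange 0 4 1 = [0, 1, 2, 3] from by decide, List.foldl]
  simp

theorem pvFlat_nonpos (num : Int) (h : ¬ 0 < num) : pvFlatBytes num = [] := by
  rw [pvFlatBytes, dif_neg h]

theorem pvFlat_pos (num : Int) (h : 0 < num) :
    pvFlatBytes num =
      PySem.Int.toStr (PySem.Int.mod num 256) :: pvFlatBytes (PySem.Int.floordiv num 256) := by
  rw [pvFlatBytes, dif_pos h]

theorem pvGroups4_cons4 (a b c d : String) (rest : List String) :
    pvGroups4 (a :: b :: c :: d :: rest) = PySem.Str.join "." [a, b, c, d] :: pvGroups4 rest := by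
  rw [pvGroups4.eq_def, if_neg (by simp)]
  rw [PySem.List.slice_toNat _ (by norm_num) (by norm_num), PySem.List.slice_from _ (by norm_num)]
  simp

-- for a - 4, Python's '% 4' is unchanged (positive divisor: floor-mod = emod)
theorem pvMod_sub_four (a : Int) :
    PySem.Int.mod (a - 4) 4 = PySem.Int.mod a 4 := by
  rw [PySem.Int.mod_eq_emod_of_pos (by norm_num), PySem.Int.mod_eq_emod_of_pos (by norm_num)]
  omega

-- padding one step: for positive num, the padded flat list starts with the 4 bytes of A's group
theorem pvPadded_pos (num : Int) (h0 : 0 < num) :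
    pvPadded num =
      PySem.Int.toStr (PySem.Int.mod num 256)
      :: PySem.Int.toStr (PySem.Int.mod (PySem.Int.floordiv num 256) 256)
      :: PySem.Int.toStr (PySem.Int.mod (PySem.Int.floordiv (PySem.Int.floordiv num 256) 256) 256)
      :: PySem.Int.toStr (PySem.Int.mod (PySem.Int.floordiv (PySem.Int.floordiv (PySem.Int.floordiv num 256) 256) 256) 256)
      :: pvPadded (PySem.Int.floordiv (PySem.Int.floordiv (PySem.Int.floordiv (PySem.Int.floordiv num 256) 256) 256) 256) := by
  set n1 := PySem.Int.floordiv num 256 with hn1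
  set n2 := PySem.Int.floordiv n1 256 with hn2
  set n3 := PySem.Int.floordiv n2 256 with hn3
  set n4 := PySem.Int.floordiv n3 256 with hn4
  have s0 := pvFdStep num (le_of_lt h0)
  have s1 := pvFdStep n1 s0.1
  have s2 := pvFdStep n2 s1.1
  have s3 := pvFdStep n3 s2.1
  have hz : PySem.Int.floordiv 0 256 = 0 := by decide
  have hb0 : PySem.Int.toStr (PySem.Int.mod 0 256) = "0" := by decide
  by_cases h1 : 0 < n1
  · by_cases h2 : 0 < n2
    · by_cases h3 : 0 < n3
      · -- four or more bytes: padding lengths agree modulo 4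
        unfold pvPadded
        rw [pvFlat_pos num h0, pvFlat_pos n1 h1, pvFlat_pos n2 h2, pvFlat_pos n3 h3]
        simp only [← hn4, List.length_cons, List.cons_append]
        congr 3
        rw [show (-((((pvFlatBytes n4).length + 1 + 1 + 1 + 1 : Nat)) : Int)) =
            -((pvFlatBytes n4).length : Int) - 4 from by push_cast; ring, pvMod_sub_four]
      · -- n3 = 0, n4 = 0: three real bytes, one pad byte
        have e3 : n3 = 0 := by omega
        have e4 : n4 = 0 := by rw [hn4, e3, hz]
        unfold pvPadded
        rw [pvFlat_pos num h0, pvFlat_pos n1 h1, pvFlat_pos n2 h2, pvFlat_nonpos n3 (by omega),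
          e3, e4, pvFlat_nonpos 0 (by norm_num)]
        simp only [hb0]
        simp
    · -- n2 = n3 = n4 = 0: two real bytes, two pad bytes
      have e2 : n2 = 0 := by omega
      have e3 : n3 = 0 := by rw [hn3, e2, hz]
      have e4 : n4 = 0 := by rw [hn4, e3, hz]
      unfold pvPadded
      rw [pvFlat_pos num h0, pvFlat_pos n1 h1, pvFlat_nonpos n2 (by omega),
        e2, e3, e4, pvFlat_nonpos 0 (by norm_num)]
      simp only [hb0]
      simp
  · -- n1 = n2 = n3 = n4 = 0: one real byte, three pad bytes
    have e1 : n1 = 0 := by omega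
    have e2 : n2 = 0 := by rw [hn2, e1, hz]
    have e3 : n3 = 0 := by rw [hn3, e2, hz]
    have e4 : n4 = 0 := by rw [hn4, e3, hz]
    unfold pvPadded
    rw [pvFlat_pos num h0, pvFlat_nonpos n1 (by omega), e1, e2, e3, e4,
      pvFlat_nonpos 0 (by norm_num)]
    simp only [hb0]
    simp

theorem pvMain (num : Int) :
    pvGroups4 (pvPadded num) = (ipsLoopA num).map (fun g => PySem.Str.join "." g) := by
  by_cases h : 0 < num
  · rw [pvPadded_pos num h, pvGroups4_cons4, pvLoopA_pos num h, List.map_cons]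
    have h0 := pvFdStep num (le_of_lt h)
    have h1 := pvFdStep _ h0.1
    have h2 := pvFdStep _ h1.1
    have h3 := pvFdStep _ h2.1
    rw [pvMain (PySem.Int.floordiv (PySem.Int.floordiv (PySem.Int.floordiv (PySem.Int.floordiv num 256) 256) 256) 256)]
  · rw [pvLoopA_nonpos num h]
    unfold pvPadded
    rw [pvFlat_nonpos num h]
    simp only [List.length_nil, Nat.cast_zero, neg_zero, List.nil_append,
      show (PySem.Int.mod 0 4).toNat = 0 from by decide, List.replicate]
    rw [pvGroups4.eq_def]
    simp
termination_by num.toNat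
decreasing_by omega

-- ===== VERDICT (by name: the statement is the Claim_ definition above) =====
theorem ips_unzip_spec : Claim_equal_ips_unzip := by
  intro s _
  unfold Spec_ips_unzip ips_unzip ips_unzip_alt
  exact (pvMain (pvDecode s)).symm
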